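-- pv_equiv track=rewrite | github.com/DaweiCodingGarage/CNER | CRF/utils.py | word_set_prefix_and_suffix
-- ===== SOURCE A (Python) =====
-- def common_suffix(med_set, cutoff):
--     suffix_dict = {}
--     for i in med_set:
--         if len(i)>=4:
--             word_list = [i[-2:],i[-3:],i[-4:]]
--         elif len(i)>=3:
--             word_list = [i[-2:],i[-3:]]
--         elif len(i)>=2:
--             word_list = [i[-2:]]
--         else:
--             word_list=[]
--
--         for word in word_list:
--             if word not in suffix_dict:
--                 suffix_dict[word] = 1
--             else:
--                 suffix_dict[word] += 1
--     return {key:value for key,value in suffix_dict.items() if value>=cutoff}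
--
-- def common_prefix(med_set,cutoff):
--     prefix_dict = {}
--     for i in med_set:
--         if len(i)>=4:
--             word_list = [i[:2],i[:3],i[:4]]
--         elif len(i)>=3:
--             word_list = [i[:2],i[:3]]
--         elif len(i)>=2:
--             word_list = [i[:2]]
--         else:
--             word_list=[]
--
--         for word in word_list:
--             if word not in prefix_dict:
--                 prefix_dict[word] = 1
--             else:
--                 prefix_dict[word] += 1
--     return {key:value for key,value in prefix_dict.items() if value>=cutoff}
--
-- def word_set_prefix_and_suffix(med_set):
--     word_set_suffix =set()
--     word_set_prefix = set()
--
--     suffix = common_suffix(med_set,1)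
--     prefix = common_prefix(med_set,1)
--     for key, value in suffix.items():
--         word_set_suffix.add(key)
--
--     for key, value in prefix.items():
--         word_set_prefix.add(key)
--     return word_set_suffix, word_set_prefix
-- ===== SOURCE B (Python) =====
-- def word_set_prefix_and_suffix(med_set):
--     word_set_suffix = set()
--     word_set_prefix = set()
--     for i in med_set:
--         for n in (2, 3, 4):
--             if len(i) >= n:
--                 word_set_suffix.add(i[-n:])
--                 word_set_prefix.add(i[:n])
--     return word_set_suffix, word_set_prefix
-- ===== Notes on version B (the rewrite author's own statement) =====
-- stated objective: simpler
-- what changed: B collects the 2-4 character prefixes/suffixes directly into two sets in one pass, eliminating A's count-dict build, cutoff-1 filter and key-extraction phases and both helper functions.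
import Mathlib
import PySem

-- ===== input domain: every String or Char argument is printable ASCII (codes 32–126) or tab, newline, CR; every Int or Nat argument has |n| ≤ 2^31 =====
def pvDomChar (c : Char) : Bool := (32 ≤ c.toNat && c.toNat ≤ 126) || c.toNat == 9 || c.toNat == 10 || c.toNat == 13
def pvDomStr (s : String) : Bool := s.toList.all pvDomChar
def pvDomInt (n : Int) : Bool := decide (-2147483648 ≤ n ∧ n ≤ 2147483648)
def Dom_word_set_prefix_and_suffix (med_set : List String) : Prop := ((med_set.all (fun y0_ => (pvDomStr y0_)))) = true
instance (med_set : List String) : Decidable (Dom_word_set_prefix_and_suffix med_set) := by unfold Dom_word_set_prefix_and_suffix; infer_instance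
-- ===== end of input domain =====

-- B collects prefixes/suffixes in one pass into two sets, replacing A's count-dict/filter/extract pipeline (simpler; return value proved equal).


-- ===== PORT A =====
-- word_list for the suffix loop body of common_suffix
def pvSufWordList (i : String) : List String :=
  if PySem.Str.len i ≥ 4 then
    [PySem.Str.slice i (some (-2)) none, PySem.Str.slice i (some (-3)) none, PySem.Str.slice i (some (-4)) none]
  else if PySem.Str.len i ≥ 3 then
    [PySem.Str.slice i (some (-2)) none, PySem.Str.slice i (some (-3)) none]
  else if PySem.Str.len i ≥ 2 then
    [PySem.Str.slice i (some (-2)) none]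
  else []

-- word_list for the prefix loop body of common_prefix
def pvPreWordList (i : String) : List String :=
  if PySem.Str.len i ≥ 4 then
    [PySem.Str.slice i none (some 2), PySem.Str.slice i none (some 3), PySem.Str.slice i none (some 4)]
  else if PySem.Str.len i ≥ 3 then
    [PySem.Str.slice i none (some 2), PySem.Str.slice i none (some 3)]
  else if PySem.Str.len i ≥ 2 then
    [PySem.Str.slice i none (some 2)]
  else []

-- "if word not in d: d[word] = 1 else: d[word] += 1"
def pvCount (d : PySem.Dict String Int) (w : String) : PySem.Dict String Int :=
  if d.contains w then d.modify w 0 (· + 1) else d.insert w 1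

def common_suffix (med_set : List String) (cutoff : Int) : PySem.Dict String Int :=
  let d := med_set.foldl (fun d i => (pvSufWordList i).foldl pvCount d) PySem.Dict.empty
  PySem.Dict.ofList (d.items.filter (fun p => p.2 ≥ cutoff))

def common_prefix (med_set : List String) (cutoff : Int) : PySem.Dict String Int :=
  let d := med_set.foldl (fun d i => (pvPreWordList i).foldl pvCount d) PySem.Dict.empty
  PySem.Dict.ofList (d.items.filter (fun p => p.2 ≥ cutoff))

def word_set_prefix_and_suffix (med_set : List String) : List String × List String :=
  let sufD := common_suffix med_set 1
  let preD := common_prefix med_set 1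
  let word_set_suffix := sufD.items.foldl (fun s p => PySem.Set.add s p.1) PySem.Set.empty
  let word_set_prefix := preD.items.foldl (fun s p => PySem.Set.add s p.1) PySem.Set.empty
  (word_set_suffix, word_set_prefix)

-- ===== PORT B =====
-- body of B's "for i in med_set" loop: the inner "for n in (2, 3, 4)" loop
def pvAddAffixes (i : String) (acc : PySem.Set String × PySem.Set String) :
    PySem.Set String × PySem.Set String :=
  ([2, 3, 4] : List Int).foldl
    (fun acc n =>
      if PySem.Str.len i ≥ n then
        (PySem.Set.add acc.1 (PySem.Str.slice i (some (-n)) none),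
         PySem.Set.add acc.2 (PySem.Str.slice i none (some n)))
      else acc)
    acc

def word_set_prefix_and_suffix_alt (med_set : List String) : List String × List String :=
  med_set.foldl (fun acc i => pvAddAffixes i acc) (PySem.Set.empty, PySem.Set.empty)

-- ===== PRECONDITION & SPEC =====
def Spec_word_set_prefix_and_suffix (med_set : List String) (out : List String × List String) : Prop := out = word_set_prefix_and_suffix_alt med_set
instance (med_set : List String) (out : List String × List String) : Decidable (Spec_word_set_prefix_and_suffix med_set out) := by unfold Spec_word_set_prefix_and_suffix; infer_instance

-- ===== CLAIM (what is proved, stated in full; the proofs are below) =====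
def Claim_equal_word_set_prefix_and_suffix : Prop := ∀ (med_set : List String), Dom_word_set_prefix_and_suffix med_set → Spec_word_set_prefix_and_suffix med_set (word_set_prefix_and_suffix med_set)

-- ===== LEMMAS AND PROOFS =====

-- the Python counting step is an insert of a value ≥ 1
lemma pvCount_eq_insert (d : PySem.Dict String Int) (w : String) :
    pvCount d w = d.insert w (if d.contains w then d.getD w 0 + 1 else 1) := by
  unfold pvCount PySem.Dict.modify
  split_ifs <;> rfl

lemma pvCount_vals (d : PySem.Dict String Int) (w : String)
    (h : ∀ p ∈ d.items, 1 ≤ p.2) : ∀ p ∈ (pvCount d w).items, 1 ≤ p.2 := by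
  intro p hp
  rw [pvCount_eq_insert] at hp
  by_cases hc : d.contains w = true
  · have hv : (1 : Int) ≤ d.getD w 0 + 1 := by
      rcases hf : d.items.find? (fun p => p.1 == w) with _ | q
      · simp [PySem.Dict.getD, PySem.Dict.get?, hf]
      · have h1 := h q (List.mem_of_find?_eq_some hf)
        simp only [PySem.Dict.getD, PySem.Dict.get?, hf, Option.map_some, Option.getD_some]
        omega
    simp only [hc, if_true, PySem.Dict.insert, List.mem_map] at hp
    rcases hp with ⟨q, hq, hqe⟩
    by_cases hb : (q.1 == w) = true
    · rw [if_pos hb] at hqe; rw [← hqe]; exact hv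
    · rw [if_neg hb] at hqe; rw [← hqe]; exact h q hq
  · simp only [hc, if_false, PySem.Dict.insert, Bool.false_eq_true, List.mem_append,
      List.mem_singleton] at hp
    rcases hp with hq | rfl
    · exact h p hq
    · omega

lemma foldCount_vals (l : List String) (d : PySem.Dict String Int)
    (h : ∀ p ∈ d.items, 1 ≤ p.2) : ∀ p ∈ (l.foldl pvCount d).items, 1 ≤ p.2 := by
  induction l generalizing d with
  | nil => exact h
  | cons x xs ih => exact ih _ (pvCount_vals d x h)

lemma foldCount_keys (l : List String) (d : PySem.Dict String Int) :
    (l.foldl pvCount d).keys = PySem.Set.update d.keys l := by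
  have he : pvCount = fun (d : PySem.Dict String Int) w =>
      d.insert w (if d.contains w then d.getD w 0 + 1 else 1) :=
    funext fun d => funext fun w => pvCount_eq_insert d w
  rw [he]
  exact PySem.Dict.keys_foldl_insert l _ d

-- the outer loop over med_set, seen through one word-list function
lemma foldWords_keys (wl : String → List String) (med : List String) (d : PySem.Dict String Int) :
    (med.foldl (fun d i => (wl i).foldl pvCount d) d).keys
      = PySem.Set.update d.keys (med.flatMap wl) := by
  induction med generalizing d with
  | nil => simp [PySem.Set.update]
  | cons x xs ih =>
    simp only [List.foldl_cons, List.flatMap_cons]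
    rw [ih, foldCount_keys]
    simp only [PySem.Set.update, List.foldl_append]

lemma foldWords_vals (wl : String → List String) (med : List String) :
    ∀ p ∈ (med.foldl (fun d i => (wl i).foldl pvCount d) PySem.Dict.empty).items, 1 ≤ p.2 := by
  have : ∀ (med : List String) (d : PySem.Dict String Int), (∀ p ∈ d.items, 1 ≤ p.2) →
      ∀ p ∈ (med.foldl (fun d i => (wl i).foldl pvCount d) d).items, 1 ≤ p.2 := by
    intro med
    induction med with
    | nil => intro d h; exact h
    | cons x xs ih => intro d h; exact ih _ (foldCount_vals _ d h)
  exact this med PySem.Dict.empty (by intro p hp; simp [PySem.Dict.empty] at hp)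

-- Set.update of pairwise-new elements appends them
lemma update_disjoint (l : List String) (s : PySem.Set String)
    (hn : l.Nodup) (hd : ∀ x ∈ l, x ∉ s) : PySem.Set.update s l = s ++ l := by
  induction l generalizing s with
  | nil => simp [PySem.Set.update]
  | cons x xs ih =>
    have hx : x ∉ s := hd x (by simp)
    have : PySem.Set.add s x = s ++ [x] := PySem.Set.add_of_not_mem hx
    rw [PySem.Set.update, List.foldl_cons, this]
    have := ih (s ++ [x]) hn.of_cons (by
      intro y hy
      simp only [List.mem_append, List.mem_singleton]
      rintro (h | rfl)
      · exact hd y (by simp [hy]) h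
      · exact (List.nodup_cons.mp hn).1 hy)
    rw [PySem.Set.update] at this
    rw [this, List.append_assoc]; rfl

lemma ofList_self_of_nodup (l : List String) (hn : l.Nodup) : PySem.Set.ofList l = l := by
  have := update_disjoint l PySem.Set.empty hn (by intro x _ h; simp [PySem.Set.empty] at h)
  simpa [PySem.Set.ofList, PySem.Set.update, PySem.Set.empty] using this

-- the common_* helpers deliver exactly the stream's distinct slices as keys, with the stream's counts
lemma common_items (wl : String → List String) (med : List String) :
    (PySem.Dict.ofList
        (((med.foldl (fun d i => (wl i).foldl pvCount d) PySem.Dict.empty).items).filter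
          (fun p => p.2 ≥ 1))).items
      = (med.foldl (fun d i => (wl i).foldl pvCount d) PySem.Dict.empty).items := by
  set D := med.foldl (fun d i => (wl i).foldl pvCount d) PySem.Dict.empty with hD
  have hfil : D.items.filter (fun p => p.2 ≥ 1) = D.items := by
    apply List.filter_eq_self.mpr
    intro p hp
    simpa using foldWords_vals wl med p hp
  rw [hfil]
  have hkn : (D.items.map (fun p => p.1)).Nodup := by
    have : D.keys.Nodup := by
      rw [hD, foldWords_keys]
      have : PySem.Set.update (PySem.Dict.empty : PySem.Dict String Int).keys (med.flatMap wl)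
          = PySem.Set.ofList (med.flatMap wl) := rfl
      rw [this]
      exact PySem.Set.nodup_ofList _
    simpa [PySem.Dict.keys] using this
  unfold PySem.Dict.ofList PySem.Dict.update
  have := PySem.Dict.items_foldl_insert_fresh D.items (fun p => p.1) (fun p => p.2)
      PySem.Dict.empty (by intro a _; rfl) hkn
  simpa [PySem.Dict.empty] using this

-- A's key-collection set for either helper equals set(stream)
lemma portA_component (wl : String → List String) (med : List String) :
    ((PySem.Dict.ofList
        (((med.foldl (fun d i => (wl i).foldl pvCount d) PySem.Dict.empty).items).filter
          (fun p => p.2 ≥ 1))).items).foldl (fun s p => PySem.Set.add s p.1) PySem.Set.empty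
      = PySem.Set.ofList (med.flatMap wl) := by
  rw [common_items]
  have h1 : ((med.foldl (fun d i => (wl i).foldl pvCount d) PySem.Dict.empty).items).foldl
        (fun s p => PySem.Set.add s p.1) PySem.Set.empty
      = PySem.Set.ofList ((med.foldl (fun d i => (wl i).foldl pvCount d) PySem.Dict.empty).keys) := by
    rw [PySem.Dict.keys, PySem.Set.ofList, List.foldl_map]
  rw [h1, foldWords_keys]
  have h2 : PySem.Set.update (PySem.Dict.empty : PySem.Dict String Int).keys (med.flatMap wl)
      = PySem.Set.ofList (med.flatMap wl) := rfl
  rw [h2, ofList_self_of_nodup _ (PySem.Set.nodup_ofList _)]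

-- B's inner loop over (2,3,4) adds exactly A's two word_lists, in A's order
lemma portB_word (i : String) (acc : PySem.Set String × PySem.Set String) :
    pvAddAffixes i acc
      = (PySem.Set.update acc.1 (pvSufWordList i), PySem.Set.update acc.2 (pvPreWordList i)) := by
  by_cases h4 : (4 : Int) ≤ (i.length : Int)
  · have h3 : (3 : Int) ≤ (i.length : Int) := by omega
    have h2 : (2 : Int) ≤ (i.length : Int) := by omega
    simp [pvAddAffixes, pvSufWordList, pvPreWordList, h4, h3, h2, ge_iff_le, PySem.Set.update]
  · by_cases h3 : (3 : Int) ≤ (i.length : Int)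
    · have h2 : (2 : Int) ≤ (i.length : Int) := by omega
      simp [pvAddAffixes, pvSufWordList, pvPreWordList, h4, h3, h2, ge_iff_le, PySem.Set.update]
    · by_cases h2 : (2 : Int) ≤ (i.length : Int)
      · simp [pvAddAffixes, pvSufWordList, pvPreWordList, h4, h3, h2, ge_iff_le, PySem.Set.update]
      · simp [pvAddAffixes, pvSufWordList, pvPreWordList, h4, h3, h2, ge_iff_le, PySem.Set.update]

lemma portB_fold (med : List String) (acc : PySem.Set String × PySem.Set String) :
    med.foldl (fun acc i => pvAddAffixes i acc) acc
      = (PySem.Set.update acc.1 (med.flatMap pvSufWordList),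
         PySem.Set.update acc.2 (med.flatMap pvPreWordList)) := by
  induction med generalizing acc with
  | nil => simp [PySem.Set.update]
  | cons x xs ih =>
    simp only [List.foldl_cons, List.flatMap_cons]
    rw [portB_word, ih]
    simp only [PySem.Set.update, List.foldl_append]

-- ===== VERDICT (by name: the statement is the Claim_ definition above) =====
theorem word_set_prefix_and_suffix_spec : Claim_equal_word_set_prefix_and_suffix := by
  intro med _
  unfold Spec_word_set_prefix_and_suffix word_set_prefix_and_suffix word_set_prefix_and_suffix_alt
      common_suffix common_prefix
  rw [portB_fold]
  exact Prod.ext (portA_component pvSufWordList med) (portA_component pvPreWordList med)
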